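-- pv_equiv track=rewrite | github.com/azargh/python_hw | hw3_part2.py | get_palindrom_dict
-- ===== SOURCE A (Python) =====
-- def get_palindrom_dict(str):
--     palindrom_dict = {}
--
--     for t in range(len(str)):
--
--         for i in range(len(str) - t):
--             partial_string = str[i:(t + i + 1)]
--             reverse_string = partial_string[-1: -(t + 1) -1 : -1]
--
--             if(partial_string == reverse_string):
--
--                 if((t + 1) in palindrom_dict):
--                     palindrom_dict[t + 1].append(partial_string)
--
--                 else:
--                     palindrom_dict[t + 1] = [partial_string]
--
--     return palindrom_dict
-- ===== SOURCE B (Python) =====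
-- def get_palindrom_dict(str):
--     n = len(str)
--     # DP table: pal[(i, j)] == True iff str[i:j+1] is a palindrome; filled by increasing length
--     pal = {}
--     for length in range(1, n + 1):
--         for i in range(n - length + 1):
--             j = i + length - 1
--             pal[(i, j)] = str[i] == str[j] and (length < 3 or pal[(i + 1, j - 1)])
--     palindrom_dict = {}
--     for length in range(1, n + 1):
--         for i in range(n - length + 1):
--             if pal[(i, i + length - 1)]:
--                 palindrom_dict.setdefault(length, []).append(str[i:i + length])
--     return palindrom_dict
-- ===== Notes on version B (the rewrite author's own statement) =====
-- stated objective: alternative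
-- what changed: A re-tests every substring by slicing and reversing it inside the double loop; B first fills a dynamic-programming table pal[(i,j)] (s[i:j+1] palindromic iff s[i]==s[j] and the inside is) by increasing length and then collects the substrings in a separate pass via table lookups.
import Mathlib
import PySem

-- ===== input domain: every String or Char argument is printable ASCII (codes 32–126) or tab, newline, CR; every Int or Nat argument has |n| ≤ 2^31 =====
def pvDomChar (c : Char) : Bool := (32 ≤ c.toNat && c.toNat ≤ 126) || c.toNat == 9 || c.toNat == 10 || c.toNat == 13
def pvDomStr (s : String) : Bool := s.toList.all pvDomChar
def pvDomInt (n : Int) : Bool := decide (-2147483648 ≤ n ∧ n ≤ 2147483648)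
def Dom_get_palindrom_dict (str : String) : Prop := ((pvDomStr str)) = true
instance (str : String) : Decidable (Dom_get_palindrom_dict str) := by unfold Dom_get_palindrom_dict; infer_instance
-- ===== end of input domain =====

-- B replaces A's slice-and-reverse palindrome test inside the double loop by a DP table
-- (pal[(i,j)] ↔ s[i:j+1] palindromic, filled by increasing length) plus a separate collection pass.

-- ===== PORT A =====
def get_palindrom_dict (str : String) : List (Int × List String) :=
  ((PySem.List.pyRange 0 (PySem.Str.len str) 1).foldl (fun pd t =>
    (PySem.List.pyRange 0 (PySem.Str.len str - t) 1).foldl (fun pd i =>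
      let partial_string := PySem.Str.slice str (some i) (some (t + i + 1))
      -- step of the Python slice is -1 ≠ 0, so slice? is always `some`: getD "" is exact
      let reverse_string := (PySem.Str.slice? partial_string (some (-1)) (some (-(t + 1) - 1)) (-1)).getD ""
      if partial_string == reverse_string then
        if pd.contains (t + 1) then pd.modify (t + 1) [] (fun l => l ++ [partial_string])
        else pd.insert (t + 1) [partial_string]
      else pd)
      pd) (PySem.Dict.empty : PySem.Dict Int (List String))).items

-- ===== PORT B =====
def get_palindrom_dict_alt (str : String) : List (Int × List String) :=
  let n : Int := PySem.Str.len str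
  let pal : PySem.Dict (Int × Int) Bool :=
    (PySem.List.pyRange 1 (n + 1) 1).foldl (fun pal length =>
      (PySem.List.pyRange 0 (n - length + 1) 1).foldl (fun pal i =>
        let j := i + length - 1
        -- pal[(i+1, j-1)] is only read when length ≥ 3 and is then always present: getD false is exact
        pal.insert (i, j) ((PySem.Str.pyGet? str i == PySem.Str.pyGet? str j) &&
          (decide (length < 3) || pal.getD (i + 1, j - 1) false))) pal)
      PySem.Dict.empty
  ((PySem.List.pyRange 1 (n + 1) 1).foldl (fun pd length =>
    (PySem.List.pyRange 0 (n - length + 1) 1).foldl (fun pd i =>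
      -- pal[(i, i+length-1)] is always present here: getD false is exact
      if pal.getD (i, i + length - 1) false then
        (pd.setdefault length []).modify length [] (fun l =>
          l ++ [PySem.Str.slice str (some i) (some (i + length))])
      else pd) pd) (PySem.Dict.empty : PySem.Dict Int (List String))).items

-- ===== PRECONDITION & SPEC =====
def Spec_get_palindrom_dict (str : String) (out : List (Int × List String)) : Prop := out = get_palindrom_dict_alt str
instance (str : String) (out : List (Int × List String)) : Decidable (Spec_get_palindrom_dict str out) := by unfold Spec_get_palindrom_dict; infer_instance

-- ===== CLAIM (what is proved, stated in full; the proofs are below) =====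
def Claim_equal_get_palindrom_dict : Prop := ∀ (str : String), Dom_get_palindrom_dict str → Spec_get_palindrom_dict str (get_palindrom_dict str)

-- ===== LEMMAS AND PROOFS =====
def pvSub (cs : List Char) (i L : Nat) : List Char := (cs.drop i).take L
def pvPal (cs : List Char) (i L : Nat) : Bool := pvSub cs i L == (pvSub cs i L).reverse
def pvInner (str : String) (length : Int) (pal : PySem.Dict (Int × Int) Bool) (i : Int) : PySem.Dict (Int × Int) Bool :=
  pal.insert (i, i + length - 1) ((PySem.Str.pyGet? str i == PySem.Str.pyGet? str (i + length - 1)) &&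
    (decide (length < 3) || pal.getD (i + 1, i + length - 1 - 1) false))
def pvGood (cs : List Char) (M : Nat) (key : Int × Int) : Prop :=
  ∃ i L : Nat, 1 ≤ L ∧ L ≤ M ∧ i + L ≤ cs.length ∧ key = ((i : Int), (i : Int) + (L : Int) - 1) ∧ pvPal cs i L = true

theorem pvPal_zero (cs : List Char) (i : Nat) : pvPal cs i 0 = true := by simp [pvPal, pvSub]

theorem pvSub_decomp (cs : List Char) (m K : Nat) (h1 : m + K + 1 < cs.length) :
    pvSub cs m (K+2) = cs[m]'(by omega) :: (pvSub cs (m+1) K ++ [cs[m+K+1]'h1]) := by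
  unfold pvSub
  rw [List.drop_eq_getElem_cons (by omega), List.take_succ_cons]
  congr 1
  rw [List.take_add_one, List.getElem?_drop]
  congr 1
  rw [show m + 1 + K = m + K + 1 by omega]
  simp [List.getElem?_eq_getElem h1]

theorem pvListPalStep (a b : Char) (l : List Char) :
    ((a :: (l ++ [b])) == (a :: (l ++ [b])).reverse) = ((a == b) && (l == l.reverse)) := by
  apply Bool.coe_iff_coe.mp
  simp only [beq_iff_eq, Bool.and_eq_true]
  rw [List.reverse_cons, List.reverse_append, List.reverse_singleton]
  constructor
  · intro h
    have hab : a = b := by have := congrArg (fun t => t.head?) h; simpa using this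
    subst hab
    refine ⟨rfl, ?_⟩
    have htail : l ++ [a] = l.reverse ++ [a] := by
      have := congrArg List.tail h; simpa using this
    exact (List.append_left_inj _).mp htail
  · rintro ⟨hab, hl⟩
    subst hab
    conv_lhs => rw [hl]
    simp

theorem pvPal_rec (cs : List Char) (m M : Nat) (h : m + M < cs.length) :
    pvPal cs m (M+1) = ((cs[m]? == cs[m+M]?) && (decide (M < 2) || pvPal cs (m+1) (M-1))) := by
  cases M with
  | zero =>
    have hm : m < cs.length := by omega
    rw [pvPal, pvSub]
    rw [List.drop_eq_getElem_cons hm]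
    simp only [List.take_succ_cons, List.take_zero, List.reverse_singleton]
    simp [List.getElem?_eq_getElem hm]
  | succ K =>
    rw [pvPal, pvSub_decomp cs m K h, pvListPalStep]
    rw [List.getElem?_eq_getElem (by omega : m < cs.length), List.getElem?_eq_getElem h]
    have hor : (decide (K + 1 < 2) || pvPal cs (m+1) K) = pvPal cs (m+1) K := by
      cases K with
      | zero => simp [pvPal_zero]
      | succ K' => simp
    rw [show K + 1 - 1 = K by omega, hor]
    rfl


theorem pvGetD_empty (key : Int × Int) : (PySem.Dict.empty : PySem.Dict (Int × Int) Bool).getD key false = false := rfl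

theorem pvInner_spec (str : String) (M : Nat)
    (d : PySem.Dict (Int × Int) Bool)
    (H : ∀ key, d.getD key false = true ↔ pvGood str.toList M key) :
    ∀ (m : Nat), m + (M + 1) ≤ str.toList.length + 1 → ∀ key,
      (((PySem.List.pyRange 0 ((m : Int)) 1).foldl (pvInner str ((M : Int)+1)) d).getD key false = true) ↔
      (pvGood str.toList M key ∨
        ∃ i : Nat, i < m ∧ key = ((i : Int), (i : Int) + ((M+1 : Nat) : Int) - 1) ∧ pvPal str.toList i (M+1) = true) := by
  intro m
  induction m with
  | zero =>
    intro _ key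
    rw [show ((0:Nat):Int) = 0 by rfl, PySem.List.pyRange_one_eq_nil (by omega), List.foldl_nil, H key]
    simp
  | succ m ih =>
    intro hm key
    have hmrange : PySem.List.pyRange 0 (((m+1 : Nat)) : Int) 1 = PySem.List.pyRange 0 ((m : Int)) 1 ++ [(m : Int)] := by
      rw [show ((m+1:Nat):Int) = (m:Int)+1 by push_cast; ring]
      exact PySem.List.pyRange_one_succ_right (by omega)
    rw [hmrange, List.foldl_append]
    simp only [List.foldl_cons, List.foldl_nil]
    set d' := (PySem.List.pyRange 0 ((m : Int)) 1).foldl (pvInner str ((M : Int)+1)) d with hd'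
    have ih' := ih (by omega)
    have hbit : ((PySem.Str.pyGet? str (m : Int) == PySem.Str.pyGet? str ((m : Int) + ((M : Int)+1) - 1)) &&
        (decide (((M : Int)+1) < 3) || d'.getD ((m : Int) + 1, (m : Int) + ((M : Int)+1) - 1 - 1) false))
        = pvPal str.toList m (M+1) := by
      rw [show ((m : Int) + ((M : Int)+1) - 1) = ((m+M : Nat) : Int) by push_cast; ring]
      rw [PySem.Str.pyGet?_natCast, PySem.Str.pyGet?_natCast]
      rw [pvPal_rec str.toList m M (by omega)]
      congr 1
      by_cases hM2 : M < 2
      · have h3 : (((M : Int)+1) < 3) := by omega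
        simp [h3, hM2]
      · have h3 : ¬ (((M : Int)+1) < 3) := by omega
        have hread : d'.getD ((m : Int) + 1, ((m+M : Nat) : Int) - 1) false = pvPal str.toList (m+1) (M-1) := by
          apply Bool.coe_iff_coe.mp
          rw [ih' ((m : Int) + 1, ((m+M : Nat) : Int) - 1)]
          constructor
          · rintro (⟨i, L, hL1, hL2, hiL, h4, h5⟩ | ⟨i, h1, h2, _⟩)
            · simp only [Prod.mk.injEq] at h4
              obtain ⟨hk1, hk2⟩ := h4
              have hi : i = m + 1 := by omega
              have hL : L = M - 1 := by omega
              subst hi; subst hL; exact h5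
            · exfalso
              simp only [Prod.mk.injEq] at h2
              omega
          · intro hp
            left
            refine ⟨m+1, M-1, by omega, by omega, by omega, ?_, hp⟩
            simp only [Prod.mk.injEq]
            omega
        rw [hread]
        have hd2 : decide (((M : Int)+1) < 3) = false := by simp [h3]
        have hd2' : decide (M < 2) = false := by simp [hM2]
        rw [hd2, hd2']
    -- now case on the key
    unfold pvInner
    rw [PySem.Dict.getD_insert]
    by_cases hk : key = ((m : Int), (m : Int) + ((M : Int)+1) - 1)
    · rw [if_pos hk, hbit]
      constructor
      · intro hp
        right
        refine ⟨m, by omega, ?_, hp⟩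
        rw [hk]
        simp only [Prod.mk.injEq]
        refine ⟨trivial, by push_cast; ring⟩
      · rintro (⟨i, L, hL1, hL2, hiL, h4, h5⟩ | ⟨i, h1, h2, h3'⟩)
        · exfalso
          rw [hk] at h4
          simp only [Prod.mk.injEq] at h4
          omega
        · rw [hk] at h2
          simp only [Prod.mk.injEq] at h2
          have : i = m := by omega
          subst this
          exact h3'
    · rw [if_neg hk, ih' key]
      constructor
      · rintro (hg | ⟨i, h1, h2, h3'⟩)
        · exact Or.inl hg
        · exact Or.inr ⟨i, by omega, h2, h3'⟩
      · rintro (hg | ⟨i, h1, h2, h3'⟩)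
        · exact Or.inl hg
        · refine Or.inr ⟨i, ?_, h2, h3'⟩
          rcases Nat.lt_succ_iff_lt_or_eq.mp h1 with h | h
          · exact h
          · exfalso
            subst h
            exact hk (h2.trans (by simp only [Prod.mk.injEq]; exact ⟨trivial, by push_cast; ring⟩))

def pvTbl (str : String) (M : Nat) : PySem.Dict (Int × Int) Bool :=
  (PySem.List.pyRange 1 ((M : Int)+1) 1).foldl (fun pal length =>
    (PySem.List.pyRange 0 (PySem.Str.len str - length + 1) 1).foldl (pvInner str length) pal)
    PySem.Dict.empty

theorem pvTbl_spec (str : String) (M : Nat) (hM : M ≤ str.toList.length) :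
    ∀ key, ((pvTbl str M).getD key false = true) ↔ pvGood str.toList M key := by
  induction M with
  | zero =>
    intro key
    rw [pvTbl, show ((0:Nat):Int)+1 = 1 by rfl, PySem.List.pyRange_one_eq_nil (by omega), List.foldl_nil]
    rw [pvGetD_empty]
    simp only [Bool.false_eq_true, false_iff]
    rintro ⟨i, L, hL1, hL2, _, _, _⟩
    omega
  | succ M ih =>
    intro key
    have hrange : PySem.List.pyRange 1 (((M+1 : Nat) : Int)+1) 1
        = PySem.List.pyRange 1 ((M : Int)+1) 1 ++ [(M : Int)+1] := by
      rw [show ((M+1:Nat):Int)+1 = ((M:Int)+1)+1 by push_cast; ring]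
      exact PySem.List.pyRange_one_succ_right (by omega)
    rw [pvTbl, hrange, List.foldl_append]
    simp only [List.foldl_cons, List.foldl_nil]
    have hinner : PySem.List.pyRange 0 (PySem.Str.len str - ((M : Int)+1) + 1) 1
        = PySem.List.pyRange 0 (((str.toList.length - M : Nat)) : Int) 1 := by
      rw [PySem.Str.len_eq]
      congr 1
      omega
    rw [hinner]
    have hspec := pvInner_spec str M (pvTbl str M) (ih (by omega))
      (str.toList.length - M) (by omega) key
    rw [pvTbl] at hspec
    rw [hspec]
    constructor
    · rintro (⟨i, L, hL1, hL2, hiL, h4, h5⟩ | ⟨i, h1, h2, h3⟩)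
      · exact ⟨i, L, hL1, by omega, hiL, h4, h5⟩
      · exact ⟨i, M+1, by omega, by omega, by omega, h2, h3⟩
    · rintro ⟨i, L, hL1, hL2, hiL, h4, h5⟩
      by_cases hLM : L ≤ M
      · exact Or.inl ⟨i, L, hL1, hLM, hiL, h4, h5⟩
      · have : L = M + 1 := by omega
        subst this
        exact Or.inr ⟨i, by omega, h4, h5⟩

theorem pvTbl_getD (str : String) (tN iN : Nat) (h : iN + tN + 1 ≤ str.toList.length) :
    (pvTbl str str.toList.length).getD ((iN : Int), (iN : Int) + ((tN : Int)+1) - 1) false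
      = pvPal str.toList iN (tN+1) := by
  apply Bool.coe_iff_coe.mp
  rw [pvTbl_spec str str.toList.length (le_refl _) _]
  constructor
  · rintro ⟨i, L, hL1, hL2, hiL, h4, h5⟩
    simp only [Prod.mk.injEq] at h4
    have hi : i = iN := by omega
    have hL : L = tN + 1 := by omega
    subst hi; subst hL
    exact h5
  · intro hp
    refine ⟨iN, tN+1, by omega, by omega, by omega, ?_, hp⟩
    simp only [Prod.mk.injEq]
    exact ⟨trivial, by push_cast; ring⟩

theorem pvRangeShift (N : Nat) :
    PySem.List.pyRange 1 ((N : Int)+1) 1 = (PySem.List.pyRange 0 (N : Int) 1).map (·+1) := by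
  induction N with
  | zero => decide
  | succ n ih =>
    rw [show ((n+1:Nat):Int)+1 = ((n:Int)+1)+1 by push_cast; ring,
        PySem.List.pyRange_one_succ_right (a := 1) (by omega),
        show ((n+1:Nat):Int) = (n:Int)+1 by push_cast; ring,
        PySem.List.pyRange_one_succ_right (a := 0) (by omega), ih]
    simp

theorem pvSliceA (s : String) (m k : Nat) :
    PySem.Str.slice s (some (m:Int)) (some ((m:Int)+(k:Int))) = String.ofList ((s.toList.drop m).take k) := by
  apply String.toList_inj.mp
  rw [PySem.Str.toList_slice, show ((m:Int)+(k:Int)) = ((m+k:Nat):Int) by push_cast; ring]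
  rw [PySem.Chars.slice_eq_listSlice, PySem.List.slice_natCast, show m+k-m = k by omega]
  simp

theorem pvRevSlice (p : String) (k : Nat) (h : p.toList.length = k + 1) :
    PySem.Str.slice? p (some (-1)) (some (-((k:Int)+1) - 1)) (-1) = some (String.ofList p.toList.reverse) := by
  have hc : PySem.Chars.slice? p.toList (some (-1)) (some (-((k:Int)+1) - 1)) (-1) = some p.toList.reverse := by
    rw [PySem.Chars.slice?_eq_listSlice?]
    rw [← PySem.List.slice?_none_none_neg_one p.toList]
    simp only [PySem.List.slice?]
    rw [h]
    have : PySem.List.sliceIndices (k+1) (some (-1)) (some (-((k:Int)+1)-1)) (-1)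
         = PySem.List.sliceIndices (k+1) none none (-1) := by
      simp [PySem.List.sliceIndices]; omega
    rw [this]
  have hmap := PySem.Str.slice?_map p (some (-1)) (some (-((k:Int)+1) - 1)) (-1)
  rw [hc] at hmap
  cases ho : PySem.Str.slice? p (some (-1)) (some (-((k:Int)+1) - 1)) (-1) with
  | none => rw [ho] at hmap; simp at hmap
  | some t =>
    rw [ho] at hmap; simp at hmap
    rw [← hmap]
    simp [String.ofList_toList]

theorem pvInsertModify (d : PySem.Dict Int (List String)) (k : Int) (x : String) (h : d.contains k = false) :
    (d.insert k []).modify k [] (fun l => l ++ [x]) = d.insert k [x] := by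
  have hmem : ∀ p ∈ d.items, (p.1 == k) = false := by
    intro p hp
    unfold PySem.Dict.contains at h
    simp only [List.any_eq_false] at h
    simpa using h p hp
  have hany : (d.items.any fun p => p.1 == k) = false := by
    simp only [List.any_eq_false]; intro p hp; simp [hmem p hp]
  have hfind : List.find? (fun p => p.1 == k) d.items = none := List.find?_eq_none.mpr (by
    intro p hp; simp [hmem p hp])
  have hmap : List.map (fun p => if p.1 = k then (k, ([x] : List String)) else p) d.items = d.items := by
    rw [List.map_congr_left (g := id) (by intro p hp; simp [show ¬ p.1 = k by simpa using hmem p hp]), List.map_id]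
  unfold PySem.Dict.modify PySem.Dict.insert PySem.Dict.contains PySem.Dict.getD PySem.Dict.get?
  simp [hany, hfind, List.find?_append, hmap]

theorem pvDictStep (d : PySem.Dict Int (List String)) (k : Int) (x : String) :
    (if d.contains k then d.modify k [] (fun l => l ++ [x]) else d.insert k [x])
      = (d.setdefault k []).modify k [] (fun l => l ++ [x]) := by
  by_cases h : d.contains k
  · rw [PySem.Dict.setdefault_of_contains d [] h, if_pos h]
  · rw [PySem.Dict.setdefault_of_not_contains d [] (by simpa using h), if_neg h,
        pvInsertModify d k x (by simpa using h)]

theorem pvValA (str : String) (tN iN : Nat) :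
    PySem.Str.slice str (some (iN:Int)) (some ((tN:Int) + (iN:Int) + 1))
      = String.ofList (pvSub str.toList iN (tN+1)) := by
  rw [show ((tN:Int)+(iN:Int)+1) = ((iN:Int) + ((tN+1:Nat):Int)) by push_cast; ring]
  exact pvSliceA str iN (tN+1)

theorem pvValB (str : String) (tN iN : Nat) :
    PySem.Str.slice str (some (iN:Int)) (some ((iN:Int) + ((tN:Int) + 1)))
      = String.ofList (pvSub str.toList iN (tN+1)) := by
  rw [show ((iN:Int) + ((tN:Int)+1)) = ((iN:Int) + ((tN+1:Nat):Int)) by push_cast; ring]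
  exact pvSliceA str iN (tN+1)

theorem pvCondA (str : String) (tN iN : Nat) (h : iN + tN + 1 ≤ str.toList.length) :
    (PySem.Str.slice str (some (iN:Int)) (some ((tN:Int) + (iN:Int) + 1)) ==
      (PySem.Str.slice? (PySem.Str.slice str (some (iN:Int)) (some ((tN:Int) + (iN:Int) + 1)))
        (some (-1)) (some (-((tN:Int) + 1) - 1)) (-1)).getD "")
      = pvPal str.toList iN (tN+1) := by
  rw [pvValA str tN iN]
  have hlist : (String.ofList (pvSub str.toList iN (tN+1))).toList = pvSub str.toList iN (tN+1) := by simp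
  have hlen : (String.ofList (pvSub str.toList iN (tN+1))).toList.length = tN + 1 := by
    rw [hlist]
    unfold pvSub
    rw [List.length_take, List.length_drop]
    omega
  rw [pvRevSlice (String.ofList (pvSub str.toList iN (tN+1))) tN hlen]
  rw [hlist]
  apply Bool.coe_iff_coe.mp
  rw [beq_iff_eq, ← String.toList_inj]
  simp only [String.toList_ofList]
  rw [pvPal, beq_iff_eq]
  simp

def pvTblFull (str : String) : PySem.Dict (Int × Int) Bool :=
  (PySem.List.pyRange 1 (PySem.Str.len str + 1) 1).foldl (fun pal length =>
    (PySem.List.pyRange 0 (PySem.Str.len str - length + 1) 1).foldl (fun pal i =>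
      let j := i + length - 1
      pal.insert (i, j) ((PySem.Str.pyGet? str i == PySem.Str.pyGet? str j) &&
        (decide (length < 3) || pal.getD (i + 1, j - 1) false))) pal)
    PySem.Dict.empty

theorem pvTblFull_eq (str : String) : pvTblFull str = pvTbl str str.toList.length := by
  unfold pvTblFull pvTbl pvInner
  rw [PySem.Str.len_eq]

theorem pvTblFull_getD (str : String) (tN iN : Nat) (h : iN + tN + 1 ≤ str.toList.length) :
    (pvTblFull str).getD ((iN : Int), (iN : Int) + ((tN : Int)+1) - 1) false
      = pvPal str.toList iN (tN+1) := by
  rw [pvTblFull_eq]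
  exact pvTbl_getD str tN iN h

def pvCollect (str : String) : List (Int × List String) :=
  ((PySem.List.pyRange 1 (PySem.Str.len str + 1) 1).foldl (fun pd length =>
    (PySem.List.pyRange 0 (PySem.Str.len str - length + 1) 1).foldl (fun pd i =>
      if (pvTblFull str).getD (i, i + length - 1) false then
        (pd.setdefault length []).modify length [] (fun l =>
          l ++ [PySem.Str.slice str (some i) (some (i + length))])
      else pd) pd) (PySem.Dict.empty : PySem.Dict Int (List String))).items

theorem pvAltEq (str : String) : get_palindrom_dict_alt str = pvCollect str := by
  simp only [get_palindrom_dict_alt, pvCollect, pvTblFull]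
  congr 1

theorem pvMain (str : String) : get_palindrom_dict str = get_palindrom_dict_alt str := by
  rw [pvAltEq]
  unfold get_palindrom_dict pvCollect
  rw [PySem.Str.len_eq]
  refine congrArg PySem.Dict.items ?_
  rw [pvRangeShift, List.foldl_map]
  apply PySem.List.foldl_congr_mem
  intro pd t ht
  obtain ⟨ht0, ht1⟩ := PySem.List.mem_pyRange_one.mp ht
  obtain ⟨tN, rfl⟩ := Int.eq_ofNat_of_zero_le ht0
  simp only []
  rw [show ((str.toList.length : Int) - ((tN : Int)+1) + 1) = ((str.toList.length : Int) - (tN : Int)) by ring]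
  apply PySem.List.foldl_congr_mem
  intro pd i hi
  obtain ⟨hi0, hi1⟩ := PySem.List.mem_pyRange_one.mp hi
  obtain ⟨iN, rfl⟩ := Int.eq_ofNat_of_zero_le hi0
  have hb : iN + tN + 1 ≤ str.toList.length := by omega
  rw [pvCondA str tN iN hb, pvTblFull_getD str tN iN hb]
  by_cases hc : pvPal str.toList iN (tN+1) = true
  · rw [if_pos hc, if_pos hc, pvValA str tN iN, pvValB str tN iN, pvDictStep]
  · rw [if_neg hc, if_neg hc]

-- ===== VERDICT (by name: the statement is the Claim_ definition above) =====
theorem get_palindrom_dict_spec : Claim_equal_get_palindrom_dict := by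
  intro str _
  unfold Spec_get_palindrom_dict
  exact pvMain str
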